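-- pv_equiv track=rewrite | github.com/clara-bg/Advent-Of-Code2019-Python-Solutions | Source Code/advent04.py | check_adjacent_B
-- ===== SOURCE A (Python) =====
-- def check_adjacent_B(element):
--     letters = []
--     for i in str(element):
--         letters.append(i)
--     for i in letters:
--         if (letters.count(i) == 2):
--             return True
--     return False
-- ===== SOURCE B (Python) =====
-- def check_adjacent_B(element):
--     s = sorted(str(element))
--     i, n = 0, len(s)
--     while i < n:
--         j = i
--         while j < n and s[j] == s[i]:
--             j += 1
--         if j - i == 2:
--             return True
--         i = j
--     return False
-- ===== Notes on version B (the rewrite author's own statement) =====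
-- stated objective: alternative
-- what changed: B sorts the characters of str(element) and scans the sorted list once with two pointers, returning True when a maximal run has length exactly two, instead of A's list copy plus a repeated .count() rescan for every character.
import Mathlib
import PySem

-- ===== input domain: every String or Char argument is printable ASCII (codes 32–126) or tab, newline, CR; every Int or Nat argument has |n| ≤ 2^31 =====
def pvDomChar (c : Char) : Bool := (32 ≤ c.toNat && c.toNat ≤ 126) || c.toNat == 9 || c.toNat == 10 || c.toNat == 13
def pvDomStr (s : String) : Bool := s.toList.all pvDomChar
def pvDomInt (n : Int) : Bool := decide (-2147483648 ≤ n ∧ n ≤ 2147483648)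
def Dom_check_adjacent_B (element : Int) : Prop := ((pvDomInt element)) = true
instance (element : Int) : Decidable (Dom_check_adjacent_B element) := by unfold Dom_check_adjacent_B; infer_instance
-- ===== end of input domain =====

-- B sorts the characters and scans the sorted run-lengths once, instead of A's repeated .count() rescans (alternative algorithm).
-- ===== PORT A =====
def pvLoopA (letters : List Char) : List Char → Bool
  | [] => false
  | i :: rest => if letters.count i == 2 then true else pvLoopA letters rest

def check_adjacent_B (element : Int) : Bool :=
  let letters := ((PySem.Int.toStr element).toList).foldl (fun acc i => acc ++ [i]) []
  pvLoopA letters letters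

-- ===== PORT B =====
-- the outer while loop of Source B: at position i, the inner while advances j over the run
-- of characters equal to s[i]; takeWhile/dropWhile is that run and the rest.
def pvRuns : List Char → Bool
  | [] => false
  | c :: rest =>
    if (rest.takeWhile (fun d => d == c)).length + 1 == 2 then true
    else pvRuns (rest.dropWhile (fun d => d == c))
termination_by l => l.length
decreasing_by
  simpa using Nat.lt_succ_of_le (List.length_dropWhile_le _ _)

def check_adjacent_B_alt (element : Int) : Bool :=
  pvRuns (PySem.List.sorted ((PySem.Int.toStr element).toList) (fun c => c) false)

-- ===== PRECONDITION & SPEC =====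
def Spec_check_adjacent_B (element : Int) (out : Bool) : Prop := out = check_adjacent_B_alt element
instance (element : Int) (out : Bool) : Decidable (Spec_check_adjacent_B element out) := by unfold Spec_check_adjacent_B; infer_instance

-- ===== CLAIM (what is proved, stated in full; the proofs are below) =====
def Claim_equal_check_adjacent_B : Prop := ∀ (element : Int), Dom_check_adjacent_B element → Spec_check_adjacent_B element (check_adjacent_B element)

-- ===== LEMMAS AND PROOFS =====
lemma pvFoldlApp (l acc : List Char) : l.foldl (fun acc i => acc ++ [i]) acc = acc ++ l := by
  induction l generalizing acc with
  | nil => simp [List.foldl]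
  | cons x xs ih => simp [List.foldl, ih]

lemma pvLoopA_eq (letters l : List Char) :
    pvLoopA letters l = l.any (fun i => letters.count i == 2) := by
  induction l with
  | nil => simp [pvLoopA]
  | cons x xs ih =>
    simp only [pvLoopA, List.any_cons, ih]
    split_ifs with h <;> simp [h]

-- in a sorted list, after dropping the leading run of c, c never reappears
lemma pvDrop_ne (c : Char) (rest : List Char) (hp : rest.Pairwise (· ≤ ·))
    (hle : ∀ x ∈ rest, c ≤ x) :
    ∀ x ∈ rest.dropWhile (fun d => d == c), x ≠ c := by
  induction rest with
  | nil => simp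
  | cons a t ih =>
    rcases List.pairwise_cons.mp hp with ⟨hat, hpt⟩
    by_cases hac : (a == c) = true
    · simp only [List.dropWhile_cons, hac]
      exact ih hpt (fun x hx => hle x (List.mem_cons_of_mem _ hx))
    · simp only [List.dropWhile_cons, hac]
      intro x hx
      have hca : c < a := lt_of_le_of_ne (hle a (List.mem_cons_self)) (fun h => hac (by simp [h.symm]))
      rcases List.mem_cons.mp hx with rfl | hxt
      · exact (ne_of_gt hca)
      · exact ne_of_gt (lt_of_lt_of_le hca (hat x hxt))

lemma pvAnyCongr {α : Type} (l : List α) (p q : α → Bool) (h : ∀ x ∈ l, p x = q x) :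
    l.any p = l.any q := by
  induction l with
  | nil => rfl
  | cons a t ih =>
    simp only [List.any_cons]
    rw [h a List.mem_cons_self, ih (fun x hx => h x (List.mem_cons_of_mem _ hx))]

lemma pvRuns_eq (l : List Char) (hs : l.Pairwise (· ≤ ·)) :
    pvRuns l = l.any (fun i => l.count i == 2) := by
  induction l using pvRuns.induct with
  | case1 => simp [pvRuns]
  | case2 c rest h =>
    rw [pvRuns, if_pos h]
    rcases List.pairwise_cons.mp hs with ⟨hle, hpr⟩
    have hk : ∀ x ∈ rest.takeWhile (fun d => d == c), x = c := by
      intro x hx; simpa using List.mem_takeWhile_imp hx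
    have hsplit := List.takeWhile_append_dropWhile (p := fun d => d == c) (l := rest)
    have h0 : (rest.dropWhile (fun d => d == c)).count c = 0 := by
      rw [List.count_eq_zero]
      intro hmem
      exact pvDrop_ne c rest hpr hle c hmem rfl
    have hk' : (rest.takeWhile (fun d => d == c)).count c
        = (rest.takeWhile (fun d => d == c)).length := by
      rw [List.count_eq_length]
      intro b hb; simpa using (hk b hb).symm
    have h1 : rest.count c = (rest.takeWhile (fun d => d == c)).length := by
      conv_lhs => rw [← hsplit]
      rw [List.count_append, hk', h0, Nat.add_zero]
    have hcc : (c :: rest).count c == 2 := by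
      rw [List.count_cons_self, h1]
      simpa using h
    rw [List.any_cons, hcc, Bool.true_or]
  | case3 c rest h ih =>
    rw [pvRuns, if_neg h]
    rcases List.pairwise_cons.mp hs with ⟨hle, hpr⟩
    have hk : ∀ x ∈ rest.takeWhile (fun d => d == c), x = c := by
      intro x hx; simpa using List.mem_takeWhile_imp hx
    have hd : ∀ x ∈ rest.dropWhile (fun d => d == c), x ≠ c :=
      pvDrop_ne c rest hpr hle
    have hsplit := List.takeWhile_append_dropWhile (p := fun d => d == c) (l := rest)
    have hpr' : (rest.dropWhile (fun d => d == c)).Pairwise (· ≤ ·) :=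
      hpr.sublist (List.dropWhile_sublist _)
    have h0 : (rest.dropWhile (fun d => d == c)).count c = 0 := by
      rw [List.count_eq_zero]; intro hmem; exact hd c hmem rfl
    have hk' : (rest.takeWhile (fun d => d == c)).count c
        = (rest.takeWhile (fun d => d == c)).length := by
      rw [List.count_eq_length]; intro b hb; simpa using (hk b hb).symm
    have h1 : rest.count c = (rest.takeWhile (fun d => d == c)).length := by
      conv_lhs => rw [← hsplit]
      rw [List.count_append, hk', h0, Nat.add_zero]
    have hfc : ((c :: rest).count c == 2) = false := by
      rw [List.count_cons_self, h1]
      simpa using h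
    -- any x surviving the dropWhile has the same count in the whole list
    have hcx : ∀ x ∈ rest.dropWhile (fun d => d == c),
        (c :: rest).count x = (rest.dropWhile (fun d => d == c)).count x := by
      intro x hx
      have hxc : x ≠ c := hd x hx
      have hxk : (rest.takeWhile (fun d => d == c)).count x = 0 := by
        rw [List.count_eq_zero]
        intro hmem
        exact hxc (hk x hmem)
      have h2 : rest.count x = (rest.dropWhile (fun d => d == c)).count x := by
        conv_lhs => rw [← hsplit]
        rw [List.count_append, hxk, Nat.zero_add]
      have hcxne : c ≠ x := Ne.symm hxc
      simp [h2, hcxne]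
    -- the head and the leading run contribute nothing to the any
    have hany : ((c :: rest).any fun i => (c :: rest).count i == 2)
        = ((rest.dropWhile (fun d => d == c)).any fun i => (c :: rest).count i == 2) := by
      have hr : (rest.any fun i => (c :: rest).count i == 2)
          = (((rest.takeWhile (fun d => d == c)) ++ (rest.dropWhile (fun d => d == c))).any
              fun i => (c :: rest).count i == 2) := by
        rw [hsplit]
      have htf : ((rest.takeWhile (fun d => d == c)).any fun i => (c :: rest).count i == 2)
          = false := by
        rw [List.any_eq_false]
        intro x hx hcontra
        rw [hk x hx] at hcontra
        rw [hfc] at hcontra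
        exact absurd hcontra (by simp)
      rw [List.any_cons, hr, List.any_append, hfc, htf, Bool.false_or, Bool.false_or]
    rw [hany, ih hpr']
    exact pvAnyCongr _ _ _ (fun x hx => by rw [hcx x hx])

lemma pvAnySorted (xs : List Char) :
    xs.any (fun i => xs.count i == 2)
      = pvRuns (PySem.List.sorted xs (fun c => c) false) := by
  have hperm : (PySem.List.sorted xs (fun c => c) false).Perm xs :=
    PySem.List.sorted_perm xs _ false
  have hpair : (PySem.List.sorted xs (fun c => c) false).Pairwise (· ≤ ·) := by
    simpa using PySem.List.sorted_pairwise xs (fun c => c)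
  rw [pvRuns_eq _ hpair]
  have hf : (fun i => (PySem.List.sorted xs (fun c => c) false).count i == 2)
      = (fun i => xs.count i == 2) := by
    funext i; rw [hperm.count_eq i]
  rw [hf]
  exact hperm.any_eq.symm

-- ===== VERDICT (by name: the statement is the Claim_ definition above) =====
theorem check_adjacent_B_spec : Claim_equal_check_adjacent_B := by
  intro element _
  unfold Spec_check_adjacent_B check_adjacent_B check_adjacent_B_alt
  simp only [pvFoldlApp, List.nil_append, pvLoopA_eq]
  exact pvAnySorted _
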